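-- pv_equiv track=rewrite | github.com/atucker/bril | compiler/data_flow.py | get_predecessors
-- ===== SOURCE A (Python) =====
-- def get_predecessors(successors):
--     ans = {}
--     for name, _ in successors.items():
--         ans[name] = []
--     for name, ss in successors.items():
--         for successor in ss:
--             ans[successor].append(name)
--     return ans
-- ===== SOURCE B (Python) =====
-- def get_predecessors(successors):
--     # Sort-and-sweep: number the nodes, flatten the graph into (target_index, pred)
--     # edges, stable-sort by target, then cut the sorted edge list into one run per node.
--     keys = list(successors)
--     pos = {name: i for i, name in enumerate(keys)}
--     edges = sorted(((pos[s], pred) for pred, ss in successors.items() for s in ss),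
--                    key=lambda e: e[0])
--     ans = {}
--     j = 0
--     for i, name in enumerate(keys):
--         preds = []
--         while j < len(edges) and edges[j][0] == i:
--             preds.append(edges[j][1])
--             j += 1
--         ans[name] = preds
--     return ans
-- ===== Notes on version B (the rewrite author's own statement) =====
-- stated objective: alternative
-- what changed: Instead of A's pre-built table mutated by appends, B numbers the nodes, flattens the map into (target-index, predecessor) edges, stable-sorts them by target index and cuts the sorted edge list into one predecessor run per node with a single sweep.
import Mathlib
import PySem

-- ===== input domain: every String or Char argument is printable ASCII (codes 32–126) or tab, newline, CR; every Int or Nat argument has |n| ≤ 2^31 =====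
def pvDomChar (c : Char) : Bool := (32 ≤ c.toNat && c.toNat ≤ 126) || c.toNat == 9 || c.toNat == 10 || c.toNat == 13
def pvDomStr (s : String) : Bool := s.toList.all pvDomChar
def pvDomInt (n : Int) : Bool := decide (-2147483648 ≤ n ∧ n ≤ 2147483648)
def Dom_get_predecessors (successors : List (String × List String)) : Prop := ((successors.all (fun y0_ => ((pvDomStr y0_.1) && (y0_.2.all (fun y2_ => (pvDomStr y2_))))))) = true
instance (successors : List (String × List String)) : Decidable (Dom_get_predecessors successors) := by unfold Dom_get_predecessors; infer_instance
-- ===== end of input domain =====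

-- B inverts the graph by numbering the nodes, stable-sorting the flattened edge list by target index
-- and cutting it into one run per node, instead of A's build-then-append table (alternative algorithm).


-- ===== PORT A =====
-- 'ans[successor].append(name)' raises KeyError when successor is not a key; Pre_ excludes
-- those inputs, so modelling the append with Dict.modify (default []) is exact on Pre_.
def get_predecessors (successors : List (String × List String)) : List (String × List String) :=
  let ans0 : PySem.Dict String (List String) :=
    successors.foldl (fun d p => d.insert p.1 []) PySem.Dict.empty
  let ans : PySem.Dict String (List String) :=
    successors.foldl
      (fun d p => p.2.foldl (fun d s => d.modify s [] (fun l => l ++ [p.1])) d) ans0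
  ans.items

-- ===== PORT B =====
-- the 'for i, name in enumerate(keys): while edges[j][0] == i: …' sweep of Source B
def sweepB : List (Int × String) → List (Int × String) → List (String × List String)
  | _, [] => []
  | edges, (i, name) :: rest =>
      (name, (edges.takeWhile (fun e => e.1 == i)).map (fun e => e.2)) ::
        sweepB (edges.dropWhile (fun e => e.1 == i)) rest

-- 'pos[s]' raises KeyError on a successor that is not a node; Pre_ excludes those inputs,
-- so Dict.getD with default 0 is exact on Pre_.
def get_predecessors_alt (successors : List (String × List String)) : List (String × List String) :=
  let keys := successors.map (fun p => p.1)
  let pos : PySem.Dict String Int :=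
    (PySem.List.enumerate keys).foldl (fun d q => d.insert q.2 q.1) PySem.Dict.empty
  let edges := PySem.List.sorted
    (successors.flatMap (fun p => p.2.map (fun s => (pos.getD s 0, p.1)))) (fun e => e.1)
  sweepB edges (PySem.List.enumerate keys)

-- ===== PRECONDITION & SPEC =====
-- Pre_ excludes (a) inputs where some listed successor is not a key of the map (both Pythons
-- raise KeyError there) and (b) association lists with duplicate keys, which do not represent
-- a Python dict (dict construction collapses them before either Python runs).
def Pre_get_predecessors (successors : List (String × List String)) : Prop :=
  (successors.map (fun p => p.1)).Nodup ∧
    ∀ p ∈ successors, ∀ s ∈ p.2, s ∈ successors.map (fun p => p.1)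
instance (successors : List (String × List String)) : Decidable (Pre_get_predecessors successors) := by unfold Pre_get_predecessors; infer_instance

def pvWitness_get_predecessors : (List (String × List String)) :=
  [("a", ["b", "a"]), ("b", ["a"])]

def Spec_get_predecessors (successors : List (String × List String)) (out : List (String × List String)) : Prop := out = get_predecessors_alt successors
instance (successors : List (String × List String)) (out : List (String × List String)) : Decidable (Spec_get_predecessors successors out) := by unfold Spec_get_predecessors; infer_instance

-- ===== CLAIM (what is proved, stated in full; the proofs are below) =====
def Claim_equal_get_predecessors : Prop := ∀ (successors : List (String × List String)), Dom_get_predecessors successors → Pre_get_predecessors successors → Spec_get_predecessors successors (get_predecessors successors)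

-- ===== LEMMAS AND PROOFS =====

-- the common canonical value: node c's predecessors, scanned from the edge list in input order
def canonPreds (successors : List (String × List String)) (c : String) : List String :=
  successors.flatMap (fun p => (p.2.filter (fun s => s == c)).map (fun _ => p.1))

-- ---- A side ----

-- the inner Python loop 'for successor in ss: ans[successor].append(name)' keeps the key set
-- unchanged when every successor is already a key
theorem keys_inner (ss : List String) (nm : String) (d : PySem.Dict String (List String))
    (h : ∀ s ∈ ss, d.contains s = true) :
    (ss.foldl (fun d s => d.modify s [] (fun l => l ++ [nm])) d).keys = d.keys := by
  induction ss generalizing d with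
  | nil => rfl
  | cons s t ih =>
    have hs := h s (by simp)
    have hk : (d.modify s [] (fun l => l ++ [nm])).keys = d.keys := by
      rw [PySem.Dict.keys_modify, PySem.Dict.keys_insert_of_contains _ _ hs]
    simp only [List.foldl_cons]
    rw [ih, hk]
    intro x hx
    rw [PySem.Dict.contains_modify]
    simp [h x (by simp [hx])]

theorem getD_inner (ss : List String) (nm : String) (d : PySem.Dict String (List String))
    (c : String) :
    (ss.foldl (fun d s => d.modify s [] (fun l => l ++ [nm])) d).getD c []
      = d.getD c [] ++ (ss.filter (fun s => s == c)).map (fun _ => nm) := by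
  have h := PySem.Dict.getD_foldl_modify_append (l := ss.map (fun s => (s, nm))) (d := d) (c := c)
  simpa only [List.foldl_map, List.filter_map, List.map_map, Function.comp_def] using h

theorem keys_outer (l : List (String × List String)) (d : PySem.Dict String (List String))
    (h : ∀ p ∈ l, ∀ s ∈ p.2, d.contains s = true) :
    (l.foldl (fun d p => p.2.foldl (fun d s => d.modify s [] (fun l => l ++ [p.1])) d) d).keys
      = d.keys := by
  induction l generalizing d with
  | nil => rfl
  | cons q t ih =>
    have hq : ∀ s ∈ q.2, d.contains s = true := h q (by simp)
    simp only [List.foldl_cons]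
    rw [ih, keys_inner _ _ _ hq]
    intro p hp s hs
    have hc : ∀ x, (q.2.foldl (fun d s => d.modify s [] (fun l => l ++ [q.1])) d).contains x
        = decide (x ∈ d.keys) := by
      intro x
      rw [PySem.Dict.contains_eq_decide_mem_keys, keys_inner _ _ _ hq]
    rw [hc]
    have := h p (by simp [hp]) s hs
    rwa [PySem.Dict.contains_eq_decide_mem_keys] at this

theorem getD_outer (l : List (String × List String)) (d : PySem.Dict String (List String))
    (c : String) :
    (l.foldl (fun d p => p.2.foldl (fun d s => d.modify s [] (fun l => l ++ [p.1])) d) d).getD c []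
      = d.getD c [] ++ l.flatMap (fun p => (p.2.filter (fun s => s == c)).map (fun _ => p.1)) := by
  induction l generalizing d with
  | nil => simp
  | cons q t ih =>
    simp only [List.foldl_cons, List.flatMap_cons]
    rw [ih, getD_inner, List.append_assoc]

theorem aport_eq_canon (successors : List (String × List String))
    (hnod : (successors.map (fun p => p.1)).Nodup)
    (hmem : ∀ p ∈ successors, ∀ s ∈ p.2, s ∈ successors.map (fun p => p.1)) :
    get_predecessors successors = successors.map (fun p => (p.1, canonPreds successors p.1)) := by
  unfold get_predecessors
  simp only
  set d1 : PySem.Dict String (List String) :=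
    successors.foldl (fun d p => d.insert p.1 []) PySem.Dict.empty with hd1
  have hitems1 : d1.items = successors.map (fun p => (p.1, ([] : List String))) := by
    rw [hd1, PySem.Dict.items_foldl_insert_fresh successors (fun p => p.1) (fun _ => []) _
      (fun a _ => rfl) hnod]
    rfl
  have hkeys1 : d1.keys = successors.map (fun p => p.1) := by
    show d1.items.map Prod.fst = _
    rw [hitems1, List.map_map]
    rfl
  have hcont : ∀ p ∈ successors, ∀ s ∈ p.2, d1.contains s = true := by
    intro p hp s hs
    rw [PySem.Dict.contains_eq_decide_mem_keys, hkeys1]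
    simpa using hmem p hp s hs
  set d2 : PySem.Dict String (List String) :=
    successors.foldl
      (fun d p => p.2.foldl (fun d s => d.modify s [] (fun l => l ++ [p.1])) d) d1 with hd2
  have hkeys2 : d2.keys = successors.map (fun p => p.1) := by
    rw [hd2, keys_outer _ _ hcont, hkeys1]
  have hnod2 : d2.keys.Nodup := by rw [hkeys2]; exact hnod
  have hgd1 : ∀ p ∈ successors, d1.getD p.1 [] = [] := by
    intro p hp
    refine PySem.Dict.getD_of_mem_items d1 ?_ (by rw [hkeys1]; exact hnod) []
    rw [hitems1]
    exact List.mem_map.mpr ⟨p, hp, rfl⟩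
  rw [PySem.Dict.items_eq_map_keys d2 hnod2 [], hkeys2, List.map_map]
  refine (List.map_congr_left ?_).symm
  intro p hp
  simp only [Function.comp]
  rw [hd2, getD_outer, hgd1 p hp, List.nil_append]
  rfl

-- ---- B side ----

theorem enum_cons (a : String) (t : List String) (k : Int) :
    PySem.List.enumerate (a :: t) k = (k, a) :: PySem.List.enumerate t (k + 1) := rfl

theorem enum_length (l : List String) (k : Int) :
    (PySem.List.enumerate l k).length = l.length := by
  induction l generalizing k with
  | nil => rfl
  | cons a t ih => rw [enum_cons]; simp [ih]

theorem enum_getElem (l : List String) (k : Int) (j : Nat) (h : j < l.length)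
    (h2 : j < (PySem.List.enumerate l k).length) :
    (PySem.List.enumerate l k)[j] = (k + j, l[j]) := by
  induction l generalizing k j with
  | nil => simp at h
  | cons a t ih =>
    cases j with
    | zero => simp
    | succ j' =>
      have h' : j' < t.length := by simpa using h
      have h2' : j' < (PySem.List.enumerate t (k + 1)).length := by
        rw [enum_length]; exact h'
      simp only [enum_cons, List.getElem_cons_succ]
      rw [ih (k + 1) j' h' h2']
      rw [Prod.mk.injEq]
      exact ⟨by push_cast; ring, rfl⟩

theorem enum_fst_lb (l : List String) (k : Int) :
    ∀ q ∈ PySem.List.enumerate l k, k ≤ q.1 := by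
  induction l generalizing k with
  | nil => simp [PySem.List.enumerate]
  | cons a t ih =>
    rw [enum_cons]
    intro q hq
    rcases List.mem_cons.mp hq with h | h
    · simp [h]
    · have := ih (k + 1) q h; omega

theorem enum_map_snd (l : List String) (k : Int) :
    (PySem.List.enumerate l k).map (fun q => q.2) = l := by
  induction l generalizing k with
  | nil => rfl
  | cons a t ih => rw [enum_cons]; simp [ih]

theorem takeWhile_eq_filter_sorted (E : List (Int × String)) (k : Int)
    (hs : E.Pairwise (fun a b => a.1 ≤ b.1)) (hlo : ∀ e ∈ E, k ≤ e.1) :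
    E.takeWhile (fun e => e.1 == k) = E.filter (fun e => e.1 == k) := by
  induction E with
  | nil => rfl
  | cons e t ih =>
    rcases List.pairwise_cons.mp hs with ⟨he, ht⟩
    by_cases h : e.1 = k
    · simp only [List.takeWhile_cons, List.filter_cons, h, beq_self_eq_true, if_pos]
      rw [ih ht (fun x hx => hlo x (List.mem_cons_of_mem _ hx))]
    · have hk : k < e.1 := lt_of_le_of_ne (hlo e List.mem_cons_self) (Ne.symm h)
      have hnil : t.filter (fun e => e.1 == k) = [] := by
        refine List.filter_eq_nil_iff.mpr (fun x hx => ?_)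
        have hle : e.1 ≤ x.1 := by simpa using he x hx
        simp only [beq_iff_eq]
        omega
      simp [h, hnil]

theorem dropWhile_lb (E : List (Int × String)) (k : Int)
    (hs : E.Pairwise (fun a b => a.1 ≤ b.1)) (hlo : ∀ e ∈ E, k ≤ e.1) :
    ∀ e ∈ E.dropWhile (fun e => e.1 == k), k + 1 ≤ e.1 := by
  induction E with
  | nil => simp
  | cons e t ih =>
    rcases List.pairwise_cons.mp hs with ⟨he, ht⟩
    by_cases h : e.1 = k
    · simp only [List.dropWhile_cons, h, beq_self_eq_true, if_pos]
      exact ih ht (fun x hx => hlo x (List.mem_cons_of_mem _ hx))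
    · have hk : k < e.1 := lt_of_le_of_ne (hlo e List.mem_cons_self) (Ne.symm h)
      simp only [List.dropWhile_cons, beq_iff_eq, h, if_false]
      intro x hx
      rcases List.mem_cons.mp hx with h' | h'
      · subst h'; omega
      · have hle : e.1 ≤ x.1 := by simpa using he x h'
        omega

theorem filter_dropWhile (E : List (Int × String)) (k j : Int) (hj : k < j) :
    (E.dropWhile (fun e => e.1 == k)).filter (fun e => e.1 == j)
      = E.filter (fun e => e.1 == j) := by
  conv_rhs => rw [← List.takeWhile_append_dropWhile (p := fun e => e.1 == k) (l := E)]
  rw [List.filter_append]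
  have hnil : (E.takeWhile (fun e => e.1 == k)).filter (fun e => e.1 == j) = [] := by
    refine List.filter_eq_nil_iff.mpr (fun x hx => ?_)
    have := List.mem_takeWhile_imp hx
    simp only [beq_iff_eq] at this ⊢
    omega
  rw [hnil, List.nil_append]

theorem filter_insertBy (x : Int × String) (ys : List (Int × String)) (c : Int)
    (hys : ys.Pairwise (fun a b => a.1 ≤ b.1)) :
    (PySem.List.insertBy (fun a b => decide (a.1 < b.1)) x ys).filter (fun e => e.1 == c)
      = ys.filter (fun e => e.1 == c) ++ (if x.1 == c then [x] else []) := by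
  induction ys with
  | nil => by_cases h : x.1 = c <;> simp [PySem.List.insertBy, h]
  | cons y t ih =>
    rcases List.pairwise_cons.mp hys with ⟨hy, ht⟩
    by_cases hlt : x.1 < y.1
    · simp only [PySem.List.insertBy, hlt, decide_true, if_pos]
      by_cases h : x.1 = c
      · have hynil : (y :: t).filter (fun e => e.1 == c) = [] := by
          refine List.filter_eq_nil_iff.mpr (fun z hz => ?_)
          rcases List.mem_cons.mp hz with h' | h'
          · subst h'; simp only [beq_iff_eq]; omega
          · have hle : y.1 ≤ z.1 := by simpa using hy z h'
            simp only [beq_iff_eq]; omega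
        simp [h, hynil]
      · simp [List.filter_cons, h]
    · simp only [PySem.List.insertBy, hlt, decide_false, ite_false, Bool.false_eq_true]
      rw [List.filter_cons, List.filter_cons, ih ht]
      by_cases h : y.1 = c <;> simp [h]

theorem filter_sorted (l : List (Int × String)) (c : Int) :
    (PySem.List.sorted l (fun e => e.1)).filter (fun e => e.1 == c)
      = l.filter (fun e => e.1 == c) := by
  induction l using List.reverseRecOn with
  | nil => rfl
  | append_singleton l x ih =>
    rw [PySem.List.sorted_eq_foldl_insertBy, List.foldl_append, List.foldl_cons, List.foldl_nil,
      ← PySem.List.sorted_eq_foldl_insertBy]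
    rw [filter_insertBy x _ c (PySem.List.sorted_pairwise l (fun e => e.1))]
    rw [ih, List.filter_append]
    by_cases h : x.1 = c
    · simp [List.filter, h]
    · have hb : (x.1 == c) = false := by simpa using h
      simp [List.filter, hb]

theorem sweep_spec (ks : List String) (k : Int) (E : List (Int × String))
    (hs : E.Pairwise (fun a b => a.1 ≤ b.1)) (hlo : ∀ e ∈ E, k ≤ e.1) :
    sweepB E (PySem.List.enumerate ks k)
      = (PySem.List.enumerate ks k).map
          (fun q => (q.2, (E.filter (fun e => e.1 == q.1)).map (fun e => e.2))) := by
  induction ks generalizing k E with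
  | nil => rfl
  | cons a t ih =>
    rw [enum_cons, List.map_cons]
    show (a, (E.takeWhile (fun e => e.1 == k)).map (fun e => e.2)) ::
        sweepB (E.dropWhile (fun e => e.1 == k)) (PySem.List.enumerate t (k + 1)) = _
    have hs' : (E.dropWhile (fun e => e.1 == k)).Pairwise (fun a b => a.1 ≤ b.1) :=
      List.Pairwise.sublist (List.dropWhile_sublist _) hs
    rw [takeWhile_eq_filter_sorted E k hs hlo,
      ih (k + 1) _ hs' (dropWhile_lb E k hs hlo)]
    congr 1
    refine List.map_congr_left (fun q hq => ?_)
    have hq1 : k + 1 ≤ q.1 := enum_fst_lb t (k + 1) q hq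
    rw [filter_dropWhile E k q.1 (by omega)]

theorem bport_eq_canon (successors : List (String × List String))
    (hnod : (successors.map (fun p => p.1)).Nodup)
    (hmem : ∀ p ∈ successors, ∀ s ∈ p.2, s ∈ successors.map (fun p => p.1)) :
    get_predecessors_alt successors
      = successors.map (fun p => (p.1, canonPreds successors p.1)) := by
  unfold get_predecessors_alt
  simp only
  set keys := successors.map (fun p => p.1) with hkeys
  set pos : PySem.Dict String Int :=
    (PySem.List.enumerate keys).foldl (fun d q => d.insert q.2 q.1) PySem.Dict.empty with hposdef
  have hposItems : pos.items = (PySem.List.enumerate keys).map (fun q => (q.2, q.1)) := by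
    rw [hposdef, PySem.Dict.items_foldl_insert_fresh (PySem.List.enumerate keys)
      (fun q => q.2) (fun q => q.1) _ (fun a _ => rfl) (by rw [enum_map_snd]; exact hnod)]
    rfl
  have hposkeys : pos.keys = keys := by
    show pos.items.map Prod.fst = _
    rw [hposItems, List.map_map]
    exact enum_map_snd keys 0
  have hpos : ∀ s ∈ keys, pos.getD s 0 = ((keys.idxOf s : Nat) : Int) := by
    intro s hsk
    have hj : keys.idxOf s < keys.length := List.idxOf_lt_length_of_mem hsk
    have hmemI : (s, ((keys.idxOf s : Nat) : Int)) ∈ pos.items := by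
      rw [hposItems]
      refine List.mem_map.mpr ⟨(((keys.idxOf s : Nat) : Int), s), ?_, rfl⟩
      have hg : (PySem.List.enumerate keys 0)[keys.idxOf s]'(by rw [enum_length]; exact hj)
          = (((keys.idxOf s : Nat) : Int), s) := by
        rw [enum_getElem keys 0 _ hj, List.getElem_idxOf hj]
        simp
      exact hg ▸ List.getElem_mem _
    exact PySem.Dict.getD_of_mem_items pos hmemI (by rw [hposkeys]; exact hnod) 0
  have hedges : successors.flatMap (fun p => p.2.map (fun s => (pos.getD s 0, p.1)))
      = successors.flatMap (fun p => p.2.map (fun s => (((keys.idxOf s : Nat) : Int), p.1))) :=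
    List.flatMap_congr (fun p hp => List.map_congr_left (fun s hs => by
      rw [hpos s (hmem p hp s hs)]))
  rw [hedges]
  set E0 := successors.flatMap
    (fun p => p.2.map (fun s => (((keys.idxOf s : Nat) : Int), p.1))) with hE0
  have hlo : ∀ e ∈ PySem.List.sorted E0 (fun e => e.1), (0 : Int) ≤ e.1 := by
    intro e he
    have he0 : e ∈ E0 := ((PySem.List.sorted_perm E0 (fun e => e.1) false).mem_iff).mp he
    rw [hE0] at he0
    rcases List.mem_flatMap.mp he0 with ⟨p, _, hpe⟩
    rcases List.mem_map.mp hpe with ⟨s, _, rfl⟩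
    exact Int.natCast_nonneg _
  rw [sweep_spec keys 0 _ (PySem.List.sorted_pairwise E0 (fun e => e.1)) hlo]
  refine List.ext_getElem (by rw [List.length_map, enum_length, hkeys, List.length_map, List.length_map]) ?_
  intro j h1 h2
  have h2' : j < successors.length := by rwa [List.length_map] at h2
  have hjk : j < keys.length := by rw [hkeys, List.length_map]; exact h2'
  have hg := enum_getElem keys 0 j hjk (by rw [enum_length]; exact hjk)
  have hk1 : keys[j] = successors[j].1 := by simp [hkeys]
  simp only [List.getElem_map, hg, Prod.mk.injEq, Int.zero_add]
  refine ⟨hk1, ?_⟩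
  rw [filter_sorted, hE0, List.filter_flatMap, List.map_flatMap]
  unfold canonPreds
  refine List.flatMap_congr (fun p hp => ?_)
  rw [List.filter_map, List.map_map]
  have hfc : p.2.filter ((fun e => e.1 == (j : Int)) ∘ (fun s => (((keys.idxOf s : Nat) : Int), p.1)))
      = p.2.filter (fun s => s == successors[j].1) := by
    refine List.filter_congr (fun s hsp => ?_)
    simp only [Function.comp_def]
    have hsk : s ∈ keys := hmem p hp s hsp
    have hj' : keys.idxOf s < keys.length := List.idxOf_lt_length_of_mem hsk
    rw [← hk1]
    by_cases h : s = keys[j]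
    · simp [h]
      exact hnod.idxOf_getElem j hjk
    · have hidx : keys.idxOf s ≠ j := by
        intro hEq
        subst hEq
        exact h (List.getElem_idxOf hj').symm
      have e1 : (((keys.idxOf s : Nat) : Int) == (j : Int)) = false :=
        beq_eq_false_iff_ne.mpr (by exact_mod_cast hidx)
      have e2 : (s == keys[j]) = false := beq_eq_false_iff_ne.mpr h
      rw [e1, e2]
  rw [hfc]
  rfl

-- ===== VERDICT (by name: the statement is the Claim_ definition above) =====
theorem get_predecessors_spec : Claim_equal_get_predecessors := by
  intro successors _ hpre
  obtain ⟨hnod, hmem⟩ := hpre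
  show get_predecessors successors = get_predecessors_alt successors
  rw [aport_eq_canon successors hnod hmem, bport_eq_canon successors hnod hmem]
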